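-- pv_equiv track=rewrite | github.com/shafiqIrv/Tubes1_PCS | testluar.py | complete_path
-- ===== SOURCE A (Python) =====
-- def clamp(n, smallest, largest):
--     return max(smallest, min(n, largest))
--
-- def get_direction(current_x, current_y, dest_x, dest_y):
--     delta_x = clamp(dest_x - current_x, -1, 1)
--     delta_y = clamp(dest_y - current_y, -1, 1)
--     if delta_x != 0:
--         delta_y = 0
--     return (delta_x, delta_y)
--
-- def complete_path(start_x, start_y, dest_x, dest_y):
--     current_x, current_y = start_x, start_y
--     path = [(current_x, current_y)]
--
--     while (current_x, current_y) != (dest_x, dest_y):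
--         direction = get_direction(current_x, current_y, dest_x, dest_y)
--         current_x += direction[0]
--         current_y += direction[1]
--         path.append((current_x, current_y))
--
--     return path
-- ===== SOURCE B (Python) =====
-- def complete_path(start_x, start_y, dest_x, dest_y):
--     step_x = 1 if dest_x > start_x else -1
--     step_y = 1 if dest_y > start_y else -1
--     xs = [(start_x + i * step_x, start_y) for i in range(abs(dest_x - start_x) + 1)]
--     ys = [(dest_x, start_y + (j + 1) * step_y) for j in range(abs(dest_y - start_y))]
--     return xs + ys
-- ===== Notes on version B (the rewrite author's own statement) =====
-- stated objective: simpler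
-- what changed: Replaced the step-by-step while loop (one unit move per iteration via clamp/get_direction) with a closed-form construction of the two straight segments (x-leg then y-leg) as list comprehensions.
import Mathlib
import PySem

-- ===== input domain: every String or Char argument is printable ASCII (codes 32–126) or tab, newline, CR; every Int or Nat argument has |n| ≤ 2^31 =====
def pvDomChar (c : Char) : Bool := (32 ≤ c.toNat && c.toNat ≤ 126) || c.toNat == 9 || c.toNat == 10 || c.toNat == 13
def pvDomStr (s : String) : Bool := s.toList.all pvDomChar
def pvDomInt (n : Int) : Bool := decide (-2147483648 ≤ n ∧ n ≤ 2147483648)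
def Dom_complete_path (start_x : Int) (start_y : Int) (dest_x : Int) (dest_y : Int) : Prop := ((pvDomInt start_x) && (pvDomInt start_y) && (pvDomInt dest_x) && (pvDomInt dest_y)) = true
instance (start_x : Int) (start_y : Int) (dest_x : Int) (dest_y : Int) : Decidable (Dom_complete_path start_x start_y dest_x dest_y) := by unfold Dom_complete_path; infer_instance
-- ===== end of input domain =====

-- B replaces A's unit-step while loop by a closed-form construction of the two
-- straight segments (x-leg, then y-leg) as comprehensions; objective: simpler.

-- ===== PORT A =====
def clamp (n smallest largest : Int) : Int := max smallest (min n largest)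

def get_direction (current_x current_y dest_x dest_y : Int) : Int × Int :=
  let delta_x := clamp (dest_x - current_x) (-1) 1
  let delta_y := clamp (dest_y - current_y) (-1) 1
  if delta_x ≠ 0 then (delta_x, 0) else (delta_x, delta_y)

-- A's while loop over the same state (current_x, current_y), as structural
-- recursion on a fuel that bounds the number of iterations (|Δx| + |Δy|, the
-- exact number A's loop performs; fuel only makes the recursion structural).
-- The points appended inside the loop are emitted in order; the initial point
-- [(current_x, current_y)] is the cons in complete_path below.
def goA (fuel : Nat) (current_x current_y dest_x dest_y : Int) : List (Int × Int) :=
  match fuel with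
  | 0 => []
  | f + 1 =>
    if (current_x, current_y) = (dest_x, dest_y) then []
    else
      let d := get_direction current_x current_y dest_x dest_y
      (current_x + d.1, current_y + d.2) :: goA f (current_x + d.1) (current_y + d.2) dest_x dest_y

def complete_path (start_x : Int) (start_y : Int) (dest_x : Int) (dest_y : Int) : List (Int × Int) :=
  (start_x, start_y) ::
    goA ((dest_x - start_x).natAbs + (dest_y - start_y).natAbs) start_x start_y dest_x dest_y

-- ===== PORT B =====
-- Source B's comprehensions over range(abs(...)+1) / range(abs(...)) are ported as
-- List.range over the (nonnegative) natAbs counts, exact for Python's range(n), n ≥ 0.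
def complete_path_alt (start_x : Int) (start_y : Int) (dest_x : Int) (dest_y : Int) : List (Int × Int) :=
  let step_x : Int := if dest_x > start_x then 1 else -1
  let step_y : Int := if dest_y > start_y then 1 else -1
  let xs := (List.range ((dest_x - start_x).natAbs + 1)).map
      (fun (i : Nat) => (start_x + (i : Int) * step_x, start_y))
  let ys := (List.range ((dest_y - start_y).natAbs)).map
      (fun (j : Nat) => (dest_x, start_y + ((j : Int) + 1) * step_y))
  xs ++ ys

-- ===== PRECONDITION & SPEC =====
def Spec_complete_path (start_x : Int) (start_y : Int) (dest_x : Int) (dest_y : Int) (out : List (Int × Int)) : Prop := out = complete_path_alt start_x start_y dest_x dest_y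
instance (start_x : Int) (start_y : Int) (dest_x : Int) (dest_y : Int) (out : List (Int × Int)) : Decidable (Spec_complete_path start_x start_y dest_x dest_y out) := by unfold Spec_complete_path; infer_instance

-- ===== CLAIM (what is proved, stated in full; the proofs are below) =====
def Claim_equal_complete_path : Prop := ∀ (start_x : Int) (start_y : Int) (dest_x : Int) (dest_y : Int), Dom_complete_path start_x start_y dest_x dest_y → Spec_complete_path start_x start_y dest_x dest_y (complete_path start_x start_y dest_x dest_y)

-- ===== LEMMAS AND PROOFS =====

theorem goA_self (fuel : Nat) (dx dy : Int) : goA fuel dx dy dx dy = [] := by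
  cases fuel <;> simp [goA]

-- y-leg, upward: once current_x = dest_x the loop moves current_y one step at a time.
theorem goA_y_up (dx cy dy : Int) (fuel : Nat) (h : cy ≤ dy) (hf : (dy - cy).toNat ≤ fuel) :
    goA fuel dx cy dx dy = (List.range (dy - cy).toNat).map (fun (j : Nat) => (dx, cy + (j : Int) + 1)) := by
  obtain ⟨n, hn⟩ : ∃ n, (dy - cy).toNat = n := ⟨_, rfl⟩
  induction n generalizing cy fuel with
  | zero =>
    have hcd : cy = dy := by omega
    subst hcd
    simp [goA_self]
  | succ n ih =>
    have hlt : cy < dy := by omega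
    obtain ⟨f, rfl⟩ : ∃ f, fuel = f + 1 := ⟨fuel - 1, by omega⟩
    have hd : get_direction dx cy dx dy = (0, 1) := by
      have h2 : min (dy - cy) 1 = 1 := by omega
      simp [get_direction, clamp, h2]
    rw [goA, if_neg (by simp; omega), hd]
    simp only [add_zero]
    rw [ih (cy + 1) f (by omega) (by omega) (by omega)]
    have hm : (dy - (cy + 1)).toNat = n := by omega
    rw [hm, hn, List.range_succ_eq_map, List.map_cons, List.map_map]
    refine congrArg₂ _ (by norm_num) ?_
    refine List.map_congr_left (fun j _ => ?_)
    simp only [Function.comp, Nat.succ_eq_add_one]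
    push_cast
    ring_nf

theorem goA_y_down (dx cy dy : Int) (fuel : Nat) (h : dy ≤ cy) (hf : (cy - dy).toNat ≤ fuel) :
    goA fuel dx cy dx dy = (List.range (cy - dy).toNat).map (fun (j : Nat) => (dx, cy - (j : Int) - 1)) := by
  obtain ⟨n, hn⟩ : ∃ n, (cy - dy).toNat = n := ⟨_, rfl⟩
  induction n generalizing cy fuel with
  | zero =>
    have hcd : cy = dy := by omega
    subst hcd
    simp [goA_self]
  | succ n ih =>
    have hlt : dy < cy := by omega
    obtain ⟨f, rfl⟩ : ∃ f, fuel = f + 1 := ⟨fuel - 1, by omega⟩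
    have hd : get_direction dx cy dx dy = (0, -1) := by
      have h2 : max (-1 : Int) (min (dy - cy) 1) = -1 := by omega
      simp [get_direction, clamp, h2]
    rw [goA, if_neg (by simp; omega), hd]
    simp only [add_zero]
    have hstep : cy + (-1 : Int) = cy - 1 := by ring
    rw [hstep, ih (cy - 1) f (by omega) (by omega) (by omega)]
    have hm : (cy - 1 - dy).toNat = n := by omega
    rw [hm, hn, List.range_succ_eq_map, List.map_cons, List.map_map]
    refine congrArg₂ _ (by norm_num) ?_
    refine List.map_congr_left (fun j _ => ?_)
    simp only [Function.comp, Nat.succ_eq_add_one]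
    push_cast
    ring_nf

-- x-leg: while current_x ≠ dest_x the loop moves only in x, then continues with the y-leg.
theorem goA_x_up (cx cy dx dy : Int) (fuel : Nat) (h : cx ≤ dx) (hf : (dx - cx).toNat ≤ fuel) :
    goA fuel cx cy dx dy = (List.range (dx - cx).toNat).map (fun (i : Nat) => (cx + (i : Int) + 1, cy))
      ++ goA (fuel - (dx - cx).toNat) dx cy dx dy := by
  obtain ⟨n, hn⟩ : ∃ n, (dx - cx).toNat = n := ⟨_, rfl⟩
  induction n generalizing cx fuel with
  | zero =>
    have hcd : cx = dx := by omega
    subst hcd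
    simp
  | succ n ih =>
    have hlt : cx < dx := by omega
    obtain ⟨f, rfl⟩ : ∃ f, fuel = f + 1 := ⟨fuel - 1, by omega⟩
    have hd : get_direction cx cy dx dy = (1, 0) := by
      have h2 : min (dx - cx) 1 = 1 := by omega
      simp [get_direction, clamp, h2]
    rw [goA, if_neg (by simp; omega), hd]
    simp only [add_zero]
    rw [ih (cx + 1) f (by omega) (by omega) (by omega)]
    have hm : (dx - (cx + 1)).toNat = n := by omega
    have hm2 : f - (dx - (cx + 1)).toNat = f + 1 - (dx - cx).toNat := by omega
    rw [hm2, hm, hn, List.range_succ_eq_map, List.map_cons, List.map_map, List.cons_append]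
    refine congrArg₂ _ (by norm_num) ?_
    refine congrArg₂ _ ?_ rfl
    refine List.map_congr_left (fun j _ => ?_)
    simp only [Function.comp, Nat.succ_eq_add_one]
    push_cast
    ring_nf

theorem goA_x_down (cx cy dx dy : Int) (fuel : Nat) (h : dx ≤ cx) (hf : (cx - dx).toNat ≤ fuel) :
    goA fuel cx cy dx dy = (List.range (cx - dx).toNat).map (fun (i : Nat) => (cx - (i : Int) - 1, cy))
      ++ goA (fuel - (cx - dx).toNat) dx cy dx dy := by
  obtain ⟨n, hn⟩ : ∃ n, (cx - dx).toNat = n := ⟨_, rfl⟩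
  induction n generalizing cx fuel with
  | zero =>
    have hcd : cx = dx := by omega
    subst hcd
    simp
  | succ n ih =>
    have hlt : dx < cx := by omega
    obtain ⟨f, rfl⟩ : ∃ f, fuel = f + 1 := ⟨fuel - 1, by omega⟩
    have hd : get_direction cx cy dx dy = (-1, 0) := by
      have h2 : max (-1 : Int) (min (dx - cx) 1) = -1 := by omega
      simp [get_direction, clamp, h2]
    rw [goA, if_neg (by simp; omega), hd]
    simp only [add_zero]
    have hstep : cx + (-1 : Int) = cx - 1 := by ring
    rw [hstep, ih (cx - 1) f (by omega) (by omega) (by omega)]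
    have hm : (cx - 1 - dx).toNat = n := by omega
    have hm2 : f - (cx - 1 - dx).toNat = f + 1 - (cx - dx).toNat := by omega
    rw [hm2, hm, hn, List.range_succ_eq_map, List.map_cons, List.map_map, List.cons_append]
    refine congrArg₂ _ (by norm_num) ?_
    refine congrArg₂ _ ?_ rfl
    refine List.map_congr_left (fun j _ => ?_)
    simp only [Function.comp, Nat.succ_eq_add_one]
    push_cast
    ring_nf

theorem main_eq (sx sy dx dy : Int) : complete_path sx sy dx dy = complete_path_alt sx sy dx dy := by
  simp only [complete_path, complete_path_alt]
  by_cases hx : dx > sx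
  · rw [if_pos hx]
    have hax : (dx - sx).natAbs = (dx - sx).toNat := by omega
    have hfu : (dx - sx).natAbs + (dy - sy).natAbs - (dx - sx).toNat = (dy - sy).natAbs := by omega
    rw [goA_x_up _ _ _ _ _ (le_of_lt hx) (by omega), hfu, hax, List.range_succ_eq_map,
        List.map_cons, List.map_map, List.cons_append]
    refine congrArg₂ _ (by norm_num) ?_
    refine congrArg₂ _ (List.map_congr_left (fun i _ => by
      simp only [Function.comp, Nat.succ_eq_add_one]; push_cast; ring_nf)) ?_
    by_cases hy : dy > sy
    · rw [if_pos hy]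
      have hay : (dy - sy).natAbs = (dy - sy).toNat := by omega
      rw [goA_y_up _ _ _ _ (le_of_lt hy) (by omega), hay]
      exact List.map_congr_left (fun j _ => by ring_nf)
    · rw [if_neg hy]
      have hle : dy ≤ sy := by omega
      have hay : (dy - sy).natAbs = (sy - dy).toNat := by omega
      rw [goA_y_down _ _ _ _ hle (by omega), hay]
      exact List.map_congr_left (fun j _ => by ring_nf)
  · rw [if_neg hx]
    have hlex : dx ≤ sx := by omega
    have hax : (dx - sx).natAbs = (sx - dx).toNat := by omega
    have hfu : (dx - sx).natAbs + (dy - sy).natAbs - (sx - dx).toNat = (dy - sy).natAbs := by omega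
    rw [goA_x_down _ _ _ _ _ hlex (by omega), hfu, hax, List.range_succ_eq_map,
        List.map_cons, List.map_map, List.cons_append]
    refine congrArg₂ _ (by norm_num) ?_
    refine congrArg₂ _ (List.map_congr_left (fun i _ => by
      simp only [Function.comp, Nat.succ_eq_add_one]; push_cast; ring_nf)) ?_
    by_cases hy : dy > sy
    · rw [if_pos hy]
      have hay : (dy - sy).natAbs = (dy - sy).toNat := by omega
      rw [goA_y_up _ _ _ _ (le_of_lt hy) (by omega), hay]
      exact List.map_congr_left (fun j _ => by ring_nf)
    · rw [if_neg hy]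
      have hle : dy ≤ sy := by omega
      have hay : (dy - sy).natAbs = (sy - dy).toNat := by omega
      rw [goA_y_down _ _ _ _ hle (by omega), hay]
      exact List.map_congr_left (fun j _ => by ring_nf)

-- ===== VERDICT (by name: the statement is the Claim_ definition above) =====
theorem complete_path_spec : Claim_equal_complete_path := by
  intro sx sy dx dy _
  exact main_eq sx sy dx dy
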